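-- pv_equiv track=rewrite | github.com/stav-af/xai_framework | src/brute_resp_map.py | occlude
-- ===== SOURCE A (Python) =====
-- NEUTRAL_VALUE = 1
--
-- def occlude(data, partitions):
--     acc = []
--     for (idx, elem) in enumerate(data):
--         if all((not idx in partition) for partition in partitions):
--             acc.append(elem)
--         else:
--             acc.append(NEUTRAL_VALUE)
--
--     return acc
-- ===== SOURCE B (Python) =====
-- NEUTRAL_VALUE = 1
--
-- def occlude(data, partitions):
--     result = list(data)
--     n = len(result)
--     for partition in partitions:
--         for idx in partition:
--             if 0 <= idx < n:
--                 result[idx] = NEUTRAL_VALUE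
--     return result
-- ===== Notes on version B (the rewrite author's own statement) =====
-- stated objective: alternative
-- what changed: B copies the input once and scatters the neutral value at each in-range partition index, instead of scanning every data index and testing it for membership in every partition.
import Mathlib
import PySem

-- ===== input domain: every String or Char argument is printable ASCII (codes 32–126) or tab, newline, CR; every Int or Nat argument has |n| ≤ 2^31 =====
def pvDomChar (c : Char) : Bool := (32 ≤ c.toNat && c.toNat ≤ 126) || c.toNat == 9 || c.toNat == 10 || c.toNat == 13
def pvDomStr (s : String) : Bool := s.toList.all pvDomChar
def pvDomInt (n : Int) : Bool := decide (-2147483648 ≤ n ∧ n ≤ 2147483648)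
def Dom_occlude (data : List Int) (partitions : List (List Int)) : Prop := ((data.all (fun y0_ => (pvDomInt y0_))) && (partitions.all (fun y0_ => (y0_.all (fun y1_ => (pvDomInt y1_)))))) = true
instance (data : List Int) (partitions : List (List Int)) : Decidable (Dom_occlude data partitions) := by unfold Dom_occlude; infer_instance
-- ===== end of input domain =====

-- B builds the result by scattering the neutral value at in-range partition indices (one pass over the
-- partitions) instead of testing every data index for membership in every partition.

-- ===== PORT A =====
def occlude (data : List Int) (partitions : List (List Int)) : List Int :=
  (PySem.List.enumerate data).foldl
    (fun acc p =>
      if partitions.all (fun partition => !(decide (p.1 ∈ partition))) then acc ++ [p.2]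
      else acc ++ [(1 : Int)]) []

-- ===== PORT B =====
def occlude_alt (data : List Int) (partitions : List (List Int)) : List Int :=
  let n : Int := (data.length : Int)
  partitions.foldl
    (fun result partition =>
      partition.foldl
        (fun r idx => if 0 ≤ idx ∧ idx < n then r.set idx.toNat 1 else r) result)
    data

-- ===== PRECONDITION & SPEC =====
def Spec_occlude (data : List Int) (partitions : List (List Int)) (out : List Int) : Prop := out = occlude_alt data partitions
instance (data : List Int) (partitions : List (List Int)) (out : List Int) : Decidable (Spec_occlude data partitions out) := by unfold Spec_occlude; infer_instance

-- ===== CLAIM (what is proved, stated in full; the proofs are below) =====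
def Claim_equal_occlude : Prop := ∀ (data : List Int) (partitions : List (List Int)), Dom_occlude data partitions → Spec_occlude data partitions (occlude data partitions)

-- ===== LEMMAS AND PROOFS =====

-- A's fold-with-append is the map of the per-index choice over the enumeration.
theorem occ_fold (parts : List (List Int)) :
    ∀ (l : List (Int × Int)) (acc : List Int),
      l.foldl (fun acc p =>
          if parts.all (fun partition => !(decide (p.1 ∈ partition))) then acc ++ [p.2]
          else acc ++ [(1 : Int)]) acc
        = acc ++ l.map (fun p =>
            if parts.all (fun partition => !(decide (p.1 ∈ partition))) then p.2 else (1 : Int)) := by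
  intro l
  induction l with
  | nil => intro acc; simp
  | cons p rest ih =>
      intro acc
      rw [List.foldl_cons, List.map_cons, ih]
      split_ifs <;> simp

-- B's inner fold preserves length.
theorem inner_len (n : Int) (part : List Int) :
    ∀ (r : List Int),
      (part.foldl (fun r idx => if 0 ≤ idx ∧ idx < n then r.set idx.toNat 1 else r) r).length
        = r.length := by
  induction part with
  | nil => intro r; rfl
  | cons idx rest ih =>
      intro r
      by_cases h : 0 ≤ idx ∧ idx < n <;> simp [h, ih]

-- B's inner fold, read at a fixed in-range position i.
theorem inner_get (nn : Nat) (part : List Int) :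
    ∀ (r : List Int) (i : Nat), r.length = nn → i < nn →
      (part.foldl (fun r idx => if 0 ≤ idx ∧ idx < (nn : Int) then r.set idx.toNat 1 else r) r)[i]?
        = if (i : Int) ∈ part then some 1 else r[i]? := by
  induction part with
  | nil => intro r i _ _; simp
  | cons idx rest ih =>
      intro r i hr hi
      simp only [List.foldl_cons]
      by_cases hg : 0 ≤ idx ∧ idx < (nn : Int)
      · rw [if_pos hg]
        by_cases hidx : idx = (i : Int)
        · have hti : idx.toNat = i := by omega
          rw [ih (r.set idx.toNat 1) i (by simp [hr]) hi]
          have hset : (r.set idx.toNat 1)[i]? = some 1 := by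
            rw [hti]
            simp [List.getElem?_set_self', List.getElem?_eq_getElem (by omega : i < r.length)]
          have hmem : (i : Int) ∈ idx :: rest := by simp [hidx]
          rw [if_pos hmem]
          by_cases hm : (i : Int) ∈ rest
          · rw [if_pos hm]
          · rw [if_neg hm]; exact hset
        · have hne : idx.toNat ≠ i := by omega
          rw [ih (r.set idx.toNat 1) i (by simp [hr]) hi]
          have hset : (r.set idx.toNat 1)[i]? = r[i]? := List.getElem?_set_ne hne
          have : ((i : Int) ∈ idx :: rest) ↔ ((i : Int) ∈ rest) := by
            simp [List.mem_cons]; intro h; omega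
          by_cases hm : (i : Int) ∈ rest <;> simp [hm, hset, this]
      · rw [if_neg hg]
        rw [ih r i hr hi]
        have hidx : idx ≠ (i : Int) := by omega
        have : ((i : Int) ∈ idx :: rest) ↔ ((i : Int) ∈ rest) := by
          simp [List.mem_cons]; intro h; omega
        by_cases hm : (i : Int) ∈ rest <;> simp [hm, this]

-- B's outer fold, read at a fixed in-range position i.
theorem outer_get (nn : Nat) (parts : List (List Int)) :
    ∀ (r : List Int) (i : Nat), r.length = nn → i < nn →
      (parts.foldl (fun result partition =>
          partition.foldl (fun r idx => if 0 ≤ idx ∧ idx < (nn : Int) then r.set idx.toNat 1 else r)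
            result) r)[i]?
        = if (∃ p ∈ parts, (i : Int) ∈ p) then some 1 else r[i]? := by
  induction parts with
  | nil => intro r i _ _; simp
  | cons p rest ih =>
      intro r i hr hi
      simp only [List.foldl_cons]
      rw [ih _ i (by rw [inner_len, hr]) hi]
      rw [inner_get nn p r i hr hi]
      by_cases h1 : (i : Int) ∈ p <;> by_cases h2 : ∃ q ∈ rest, (i : Int) ∈ q <;>
        simp [h1, h2]

theorem outer_len (nn : Nat) (parts : List (List Int)) :
    ∀ (r : List Int),
      (parts.foldl (fun result partition =>
          partition.foldl (fun r idx => if 0 ≤ idx ∧ idx < (nn : Int) then r.set idx.toNat 1 else r)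
            result) r).length = r.length := by
  induction parts with
  | nil => intro r; rfl
  | cons p rest ih => intro r; rw [List.foldl_cons, ih, inner_len]

-- ===== VERDICT (by name: the statement is the Claim_ definition above) =====
theorem occlude_spec : Claim_equal_occlude := by
  intro data partitions _
  unfold Spec_occlude occlude
  simp only [occlude_alt]
  rw [occ_fold]
  apply List.ext_getElem?
  intro i
  simp only [List.nil_append, List.getElem?_map, PySem.List.getElem?_enumerate]
  by_cases hi : i < data.length
  · rw [outer_get data.length partitions data i rfl hi]
    have hd : data[i]? = some data[i] := List.getElem?_eq_getElem hi
    by_cases h : ∃ p ∈ partitions, (i : Int) ∈ p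
    · have hall : ¬ (partitions.all (fun partition => !(decide ((i : Int) ∈ partition))) = true) := by
        simp [List.all_eq_true]; exact h
      simp [hd, h]
    · have hall : partitions.all (fun partition => !(decide ((i : Int) ∈ partition))) = true := by
        simp [List.all_eq_true]; exact fun p hp => (fun hm => h ⟨p, hp, hm⟩)
      simp [hd, h]
  · have hd : data[i]? = none := List.getElem?_eq_none (by omega)
    have hb : (partitions.foldl (fun result partition =>
        partition.foldl (fun r idx => if 0 ≤ idx ∧ idx < ((data.length : Nat) : Int) then r.set idx.toNat 1 else r)
          result) data)[i]? = none := by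
      apply List.getElem?_eq_none
      rw [outer_len]; omega
    simp [hd, hb]
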